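-- pv_equiv track=rewrite | github.com/PeterShanxin/EC-Bench | tfpc/utils/Gene_ontology_utils.py | get_nb_annotations_all_GO_id_at_the_same_time
-- ===== SOURCE A (Python) =====
-- def get_nb_annotations_all_GO_id_at_the_same_time(list_go_id, annotations):
--     intersection = None
--     for go_id in list_go_id:
--         id_annot = annotations[go_id]
--         if intersection is None:
--             intersection = set(id_annot)
--         else:
--             intersection = intersection.intersection(set(id_annot))
--     if intersection is None:
--         raise RuntimeError("No annotations found")
--     return len(intersection)
-- ===== SOURCE B (Python) =====
-- def get_nb_annotations_all_GO_id_at_the_same_time(list_go_id, annotations):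
--     if not list_go_id:
--         raise RuntimeError("No annotations found")
--     counts = {}
--     for go_id in list_go_id:
--         for annot in set(annotations[go_id]):
--             counts[annot] = counts.get(annot, 0) + 1
--     n = len(list_go_id)
--     return sum(1 for v in counts.values() if v == n)
-- ===== Notes on version B (the rewrite author's own statement) =====
-- stated objective: alternative
-- what changed: B replaces A's iterated set-intersection accumulator by a frequency table (dict counter over the per-GO-id deduplicated annotation sets) and counts the keys whose count equals len(list_go_id).
import Mathlib
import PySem

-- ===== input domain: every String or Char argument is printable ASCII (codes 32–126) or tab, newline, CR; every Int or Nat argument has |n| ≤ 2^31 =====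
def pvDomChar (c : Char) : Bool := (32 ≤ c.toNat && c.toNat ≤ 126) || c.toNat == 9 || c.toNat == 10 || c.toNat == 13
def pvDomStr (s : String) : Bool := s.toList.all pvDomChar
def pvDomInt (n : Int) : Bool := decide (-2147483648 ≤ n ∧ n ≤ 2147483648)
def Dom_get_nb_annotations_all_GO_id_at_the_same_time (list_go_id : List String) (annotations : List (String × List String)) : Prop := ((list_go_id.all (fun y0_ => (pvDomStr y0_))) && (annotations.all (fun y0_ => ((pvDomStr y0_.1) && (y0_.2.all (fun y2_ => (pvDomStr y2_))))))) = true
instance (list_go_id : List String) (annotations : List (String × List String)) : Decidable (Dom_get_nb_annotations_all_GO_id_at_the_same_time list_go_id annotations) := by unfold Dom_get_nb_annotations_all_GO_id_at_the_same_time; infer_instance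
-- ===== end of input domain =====

-- B maintains a frequency table over the per-GO-id deduplicated annotation lists and counts
-- the annotations seen len(list_go_id) times, instead of A's iterated set intersection.


-- ===== PORT A =====
-- A's loop: an Option-valued intersection accumulator (none = "not started"), set() = PySem.Set.ofList,
-- set.intersection = PySem.Set.inter, annotations[go_id] = first-match assoc lookup (KeyError excluded by Pre_).
def pvInterLoop (annotations : List (String × List String)) :
    List String → Option (PySem.Set String) → Option (PySem.Set String)
  | [], inter => inter
  | go_id :: rest, inter =>
      let id_annot := ((PySem.Dict.mk annotations).get? go_id).getD []
      match inter with
      | none => pvInterLoop annotations rest (some (PySem.Set.ofList id_annot))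
      | some s => pvInterLoop annotations rest (some (PySem.Set.inter s (PySem.Set.ofList id_annot)))

def get_nb_annotations_all_GO_id_at_the_same_time (list_go_id : List String) (annotations : List (String × List String)) : Int :=
  match pvInterLoop annotations list_go_id none with
  | none => 0          -- Python raises RuntimeError here (empty list); excluded by Pre_
  | some s => PySem.Set.len s

-- ===== PORT B =====
def get_nb_annotations_all_GO_id_at_the_same_time_alt (list_go_id : List String) (annotations : List (String × List String)) : Int :=
  match list_go_id with
  | [] => 0            -- Python raises RuntimeError here; excluded by Pre_
  | _ =>
    let counts : PySem.Dict String Int :=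
      list_go_id.foldl (fun d go_id =>
        (PySem.Set.ofList (((PySem.Dict.mk annotations).get? go_id).getD [])).foldl
          (fun d a => d.insert a (d.getD a 0 + 1)) d) PySem.Dict.empty
    let n : Int := list_go_id.length
    counts.values.foldl (fun acc v => if v == n then acc + 1 else acc) 0

-- ===== PRECONDITION & SPEC =====
-- Pre_ excludes exactly the inputs where the Python A raises: the empty GO-id list (RuntimeError)
-- and a go_id missing from annotations (KeyError).
def Pre_get_nb_annotations_all_GO_id_at_the_same_time (list_go_id : List String) (annotations : List (String × List String)) : Prop :=
  list_go_id ≠ [] ∧ ∀ g ∈ list_go_id, (PySem.Dict.mk annotations).contains g = true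
instance (list_go_id : List String) (annotations : List (String × List String)) : Decidable (Pre_get_nb_annotations_all_GO_id_at_the_same_time list_go_id annotations) := by unfold Pre_get_nb_annotations_all_GO_id_at_the_same_time; infer_instance

def pvWitness_get_nb_annotations_all_GO_id_at_the_same_time : List String × (List (String × List String)) :=
  (["g1", "g2"], [("g1", ["a", "b"]), ("g2", ["b", "c"])])

def Spec_get_nb_annotations_all_GO_id_at_the_same_time (list_go_id : List String) (annotations : List (String × List String)) (out : Int) : Prop := out = get_nb_annotations_all_GO_id_at_the_same_time_alt list_go_id annotations
instance (list_go_id : List String) (annotations : List (String × List String)) (out : Int) : Decidable (Spec_get_nb_annotations_all_GO_id_at_the_same_time list_go_id annotations out) := by unfold Spec_get_nb_annotations_all_GO_id_at_the_same_time; infer_instance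

-- ===== CLAIM (what is proved, stated in full; the proofs are below) =====
def Claim_equal_get_nb_annotations_all_GO_id_at_the_same_time : Prop := ∀ (list_go_id : List String) (annotations : List (String × List String)), Dom_get_nb_annotations_all_GO_id_at_the_same_time list_go_id annotations → Pre_get_nb_annotations_all_GO_id_at_the_same_time list_go_id annotations → Spec_get_nb_annotations_all_GO_id_at_the_same_time list_go_id annotations (get_nb_annotations_all_GO_id_at_the_same_time list_go_id annotations)

-- ===== LEMMAS AND PROOFS =====

-- the deduplicated annotation set of one go_id (proof-side shorthand)
def pvSetOf (annotations : List (String × List String)) (g : String) : PySem.Set String :=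
  PySem.Set.ofList (((PySem.Dict.mk annotations).get? g).getD [])

-- A's loop, once started, is a fold of intersections
lemma pvInterLoop_some (annotations : List (String × List String)) (L : List String) (s : PySem.Set String) :
    pvInterLoop annotations L (some s) =
      some (L.foldl (fun s g => PySem.Set.inter s (pvSetOf annotations g)) s) := by
  induction L generalizing s with
  | nil => rfl
  | cons g rest ih => simp [pvInterLoop, pvSetOf, ih]

lemma mem_interFold (annotations : List (String × List String)) (L : List String) (s : PySem.Set String) (a : String) :
    a ∈ L.foldl (fun s g => PySem.Set.inter s (pvSetOf annotations g)) s ↔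
      a ∈ s ∧ ∀ g ∈ L, a ∈ pvSetOf annotations g := by
  induction L generalizing s with
  | nil => simp
  | cons g rest ih =>
    rw [List.foldl_cons, ih]
    simp only [PySem.Set.inter, List.mem_filter, PySem.Set.contains, List.contains_iff_mem,
      List.forall_mem_cons]
    tauto

lemma nodup_interFold (annotations : List (String × List String)) (L : List String) (s : PySem.Set String)
    (hs : s.Nodup) :
    (L.foldl (fun s g => PySem.Set.inter s (pvSetOf annotations g)) s).Nodup := by
  induction L generalizing s with
  | nil => exact hs
  | cons g rest ih => exact ih _ (List.Nodup.filter _ hs)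

lemma pvSetOf_nodup (annotations : List (String × List String)) (g : String) :
    (pvSetOf annotations g).Nodup := PySem.Set.nodup_ofList _

-- B's counter loop: the count of a is the number of go_ids (with multiplicity) whose set contains a
lemma pvCounts_getD (annotations : List (String × List String)) (L : List String) (d : PySem.Dict String Int) (a : String) :
    (L.foldl (fun d go_id => (pvSetOf annotations go_id).foldl (fun d a => d.insert a (d.getD a 0 + 1)) d) d).getD a 0 =
      d.getD a 0 + (L.countP (fun g => decide (a ∈ pvSetOf annotations g)) : Int) := by
  induction L generalizing d with
  | nil => simp
  | cons g rest ih =>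
    simp only [List.foldl_cons, ih, PySem.Dict.getD_foldl_insert_add_one, List.countP_cons]
    by_cases h : a ∈ pvSetOf annotations g
    · rw [List.count_eq_one_of_mem (pvSetOf_nodup annotations g) h]
      simp only [h, decide_true, if_pos]
      push_cast
      ring
    · rw [List.count_eq_zero_of_not_mem h]
      simp [h]

lemma pvCounts_mem_keys (annotations : List (String × List String)) (L : List String) (d : PySem.Dict String Int) (a : String) :
    a ∈ (L.foldl (fun d go_id => (pvSetOf annotations go_id).foldl (fun d a => d.insert a (d.getD a 0 + 1)) d) d).keys ↔
      a ∈ d.keys ∨ ∃ g ∈ L, a ∈ pvSetOf annotations g := by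
  induction L generalizing d with
  | nil => simp
  | cons g rest ih =>
    rw [List.foldl_cons, ih, PySem.Dict.keys_foldl_insert (f := fun d x => d.getD x 0 + 1),
      PySem.Set.mem_update]
    constructor
    · rintro (⟨h | h⟩ | ⟨g', hg', h⟩)
      · exact Or.inl h
      · exact Or.inr ⟨g, List.mem_cons_self, h⟩
      · exact Or.inr ⟨g', List.mem_cons_of_mem _ hg', h⟩
    · rintro (h | ⟨g', hg', h⟩)
      · exact Or.inl (Or.inl h)
      · rcases List.mem_cons.mp hg' with rfl | hg'
        · exact Or.inl (Or.inr h)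
        · exact Or.inr ⟨g', hg', h⟩

lemma pvCounts_nodup_keys (annotations : List (String × List String)) (L : List String) (d : PySem.Dict String Int)
    (hd : d.keys.Nodup) :
    (L.foldl (fun d go_id => (pvSetOf annotations go_id).foldl (fun d a => d.insert a (d.getD a 0 + 1)) d) d).keys.Nodup := by
  induction L generalizing d with
  | nil => exact hd
  | cons g rest ih =>
    exact ih _ (PySem.Dict.nodup_keys_foldl_insert _ (fun d x => d.getD x 0 + 1) _ hd)

-- two Nodup lists with the same membership have the same length
lemma length_eq_of_nodup_of_mem_iff {xs ys : List String} (hx : xs.Nodup) (hy : ys.Nodup)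
    (h : ∀ a, a ∈ xs ↔ a ∈ ys) : xs.length = ys.length := by
  rw [← List.toFinset_card_of_nodup hx, ← List.toFinset_card_of_nodup hy]
  congr 1
  ext a
  simp [h a]

-- ===== VERDICT (by name: the statement is the Claim_ definition above) =====
theorem get_nb_annotations_all_GO_id_at_the_same_time_spec : Claim_equal_get_nb_annotations_all_GO_id_at_the_same_time := by
  intro L ann _ hpre
  obtain ⟨hne, -⟩ := hpre
  unfold Spec_get_nb_annotations_all_GO_id_at_the_same_time
  obtain ⟨g0, rest, rfl⟩ := List.exists_cons_of_ne_nil hne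
  -- A's value: the length of the iterated intersection
  have hA : get_nb_annotations_all_GO_id_at_the_same_time (g0 :: rest) ann =
      ((rest.foldl (fun s g => PySem.Set.inter s (pvSetOf ann g)) (pvSetOf ann g0)).length : Int) := by
    simp [get_nb_annotations_all_GO_id_at_the_same_time, pvInterLoop, pvInterLoop_some,
      PySem.Set.len, pvSetOf]
  set counts : PySem.Dict String Int :=
    (g0 :: rest).foldl
      (fun d go_id => (pvSetOf ann go_id).foldl (fun d a => d.insert a (d.getD a 0 + 1)) d)
      PySem.Dict.empty with hcounts
  have hknd : counts.keys.Nodup :=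
    pvCounts_nodup_keys ann (g0 :: rest) _ PySem.Dict.nodup_keys_empty
  -- B's value: the number of stored counts equal to the list length
  have hB : get_nb_annotations_all_GO_id_at_the_same_time_alt (g0 :: rest) ann =
      (counts.values.countP (fun v => v == ((g0 :: rest).length : Int)) : Int) := by
    simp only [get_nb_annotations_all_GO_id_at_the_same_time_alt]
    rw [PySem.List.foldl_count_if (fun v => v == (((g0 :: rest).length : Nat) : Int))]
    simp [hcounts, pvSetOf]
  rw [hA, hB]
  -- turn B's values-count into a key-count of "a is in every go_id's set"
  rw [PySem.Dict.values_eq_map_keys counts hknd 0, List.countP_map]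
  have hcong : counts.keys.countP
        ((fun v => v == (((g0 :: rest).length : Nat) : Int)) ∘ fun k => counts.getD k 0) =
      counts.keys.countP (fun a => decide (∀ g ∈ g0 :: rest, a ∈ pvSetOf ann g)) := by
    apply List.countP_congr
    intro a _
    simp only [Function.comp_apply, hcounts, pvCounts_getD, PySem.Dict.getD_empty, zero_add]
    rw [Bool.eq_iff_iff]
    simp only [beq_iff_eq, Nat.cast_inj, decide_eq_true_eq]
    simpa using List.countP_eq_length (l := g0 :: rest) (p := fun g => decide (a ∈ pvSetOf ann g))
  rw [hcong, List.countP_eq_length_filter]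
  -- the filtered keys and the iterated intersection hold exactly the same elements
  have hmem : ∀ a, a ∈ counts.keys.filter (fun a => decide (∀ g ∈ g0 :: rest, a ∈ pvSetOf ann g)) ↔
      a ∈ rest.foldl (fun s g => PySem.Set.inter s (pvSetOf ann g)) (pvSetOf ann g0) := by
    intro a
    rw [List.mem_filter, mem_interFold, hcounts, pvCounts_mem_keys]
    simp only [decide_eq_true_eq, List.forall_mem_cons, PySem.Dict.keys_empty,
      List.not_mem_nil, false_or]
    constructor
    · rintro ⟨-, h0, hrest⟩
      exact ⟨h0, hrest⟩
    · rintro ⟨h0, hrest⟩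
      exact ⟨⟨g0, List.mem_cons_self, h0⟩, h0, hrest⟩
  have hlen := length_eq_of_nodup_of_mem_iff
    (List.Nodup.filter _ hknd)
    (nodup_interFold ann rest (pvSetOf ann g0) (pvSetOf_nodup ann g0))
    hmem
  omega
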